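-- pv_equiv track=rewrite | github.com/BaciFlorin/DHCP_Project | Message.py | nameFormat
-- ===== SOURCE A (Python) =====
-- def nameFormat(name):
--     if len(name) == 0:
--         return "INVALID"
--     else:
--         newName = ""
--         start = 0
--         end = 2
--         while name[start:end] != "00" and end <= len(name):
--             newName += chr(int(name[start:end], base=16))
--             start = end
--             end += 2
--         return newName
-- ===== SOURCE B (Python) =====
-- def nameFormat(name):
--     if len(name) == 0:
--         return "INVALID"
--     pairs = [name[i:i + 2] for i in range(0, len(name) - 1, 2)]
--     cutoff = 2 * pairs.index("00") if "00" in pairs else len(name) - len(name) % 2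
--     return bytes.fromhex(name[:cutoff]).decode("latin-1")
-- ===== Notes on version B (the rewrite author's own statement) =====
-- stated objective: faster
-- what changed: Instead of interleaving the terminator scan with per-pair chr(int(pair,16)) conversion and quadratic string concatenation, B first locates the cutoff (the first even-aligned terminator pair, or the even length) and then batch-decodes the whole prefix with bytes.fromhex and a latin-1 decode.
-- outside the precondition, e.g. on nameFormat(' 700'): A returns '\x07', B raises ValueError; on nameFormat('+500'): A returns '\x05', B raises ValueError; on nameFormat('41 32'): A returns 'A\x03', B raises ValueError
import Mathlib
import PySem

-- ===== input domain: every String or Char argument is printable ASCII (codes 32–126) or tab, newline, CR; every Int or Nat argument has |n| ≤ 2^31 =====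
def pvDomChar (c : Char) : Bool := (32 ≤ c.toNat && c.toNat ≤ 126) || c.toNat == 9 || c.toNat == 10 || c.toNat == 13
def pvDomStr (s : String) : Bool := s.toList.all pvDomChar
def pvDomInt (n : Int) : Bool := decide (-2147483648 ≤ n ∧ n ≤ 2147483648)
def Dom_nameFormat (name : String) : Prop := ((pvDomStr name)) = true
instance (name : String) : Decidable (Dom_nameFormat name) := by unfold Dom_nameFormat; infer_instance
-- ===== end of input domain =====

-- B separates terminator-finding from a single batch hex decode instead of interleaving
-- the scan with per-pair chr(int(pair,16)) conversion (objective: idiomatic).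


-- ===== PORT A =====
-- the while loop: slices name[start:end] two chars at a time, so the loop state is the
-- not-yet-consumed suffix; a one-char or empty remainder means end > len(name) (loop exits).
-- On a pair int(·,16) cannot parse, or parses to a value chr rejects, Python raises
-- ValueError; those inputs are outside Pre_ (the port just stops there).
def nameFormatLoopA (acc : List Char) : List Char → List Char
  | c1 :: c2 :: rest =>
    if ¬ ([c1, c2] = ['0', '0']) then
      match PySem.Int.ofCharsBase? [c1, c2] 16 with
      | some v => nameFormatLoopA (acc ++ [Char.ofNat v.toNat]) rest
      | none => acc
    else acc
  | _ => acc

def nameFormat (name : String) : String :=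
  let cs := name.toList
  if cs = [] then "INVALID"
  else String.ofList (nameFormatLoopA [] cs)

-- ===== PORT B =====
-- the 22 characters bytes.fromhex accepts as hex digits
def pvHexChars : List Char :=
  ['0','1','2','3','4','5','6','7','8','9','a','b','c','d','e','f','A','B','C','D','E','F']

def pvHexVal (c : Char) : Nat :=
  if c.toNat ≤ 57 then c.toNat - 48            -- '0'..'9'
  else if c.toNat ≤ 70 then c.toNat - 55       -- 'A'..'F'
  else c.toNat - 87                            -- 'a'..'f'

-- pairs = [name[i:i+2] for i in range(0, len(name) - 1, 2)]
def pvPairsB (cs : List Char) : List (List Char) :=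
  (PySem.List.pyRange 0 ((cs.length : Int) - 1) 2).map
    (fun i => PySem.Chars.slice cs (some i) (some (i + 2)))

-- cutoff = 2 * pairs.index("00") if "00" in pairs else len(name) - len(name) % 2
def pvCutB (cs : List Char) : Nat :=
  match PySem.List.index? (pvPairsB cs) ['0', '0'] with
  | some k => 2 * k
  | none => cs.length - cs.length % 2

-- ASCII whitespace, which bytes.fromhex skips anywhere in its argument
def pvIsAsciiWs (c : Char) : Bool :=
  c = ' ' || c = '\t' || c = '\n' || c = '\r' || c = '\x0b' || c = '\x0c'

-- after whitespace removal, fromhex demands strict hex-digit pairs (none = ValueError)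
def pvFromHexPairs? : List Char → Option (List Char)
  | [] => some []
  | [_] => none
  | c1 :: c2 :: rest =>
    if pvHexChars.contains c1 && pvHexChars.contains c2 then
      (pvFromHexPairs? rest).map (fun t => Char.ofNat (16 * pvHexVal c1 + pvHexVal c2) :: t)
    else none

-- bytes.fromhex(·).decode with codec latin-1
def pvFromHex? (cs : List Char) : Option (List Char) :=
  pvFromHexPairs? (cs.filter (fun c => !pvIsAsciiWs c))

def nameFormat_alt (name : String) : String :=
  let cs := name.toList
  if cs = [] then "INVALID"
  else
    match pvFromHex? (cs.take (pvCutB cs)) with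
    | some out => String.ofList out
    | none => ""          -- bytes.fromhex raises ValueError here (outside Pre_)

-- ===== PRECONDITION & SPEC =====
-- Pre_ excludes names whose even-aligned two-char pairs before the first "00" pair are not
-- strict hex-digit pairs: A returns a value on some of those (int(·,16) leniently accepts
-- whitespace and a sign inside a pair) while B's batch fromhex decode raises ValueError.
def pvHexPrefixOk : List Char → Bool
  | c1 :: c2 :: rest =>
    if c1 = '0' && c2 = '0' then true
    else pvHexChars.contains c1 && pvHexChars.contains c2 && pvHexPrefixOk rest
  | _ => true

def Pre_nameFormat (name : String) : Prop := pvHexPrefixOk name.toList = true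
instance (name : String) : Decidable (Pre_nameFormat name) := by unfold Pre_nameFormat; infer_instance

def pvWitness_nameFormat : String := "41424300ff"

def Spec_nameFormat (name : String) (out : String) : Prop := out = nameFormat_alt name
instance (name : String) (out : String) : Decidable (Spec_nameFormat name out) := by unfold Spec_nameFormat; infer_instance

-- ===== CLAIM (what is proved, stated in full; the proofs are below) =====
def Claim_equal_nameFormat : Prop := ∀ (name : String), Dom_nameFormat name → Pre_nameFormat name → Spec_nameFormat name (nameFormat name)

-- ===== LEMMAS AND PROOFS =====

-- int(pair, 16) on two strict hex digits is the two-digit value (484 concrete cases)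
theorem pvPairParse : ∀ c1 ∈ pvHexChars, ∀ c2 ∈ pvHexChars,
    PySem.Int.ofCharsBase? [c1, c2] 16 = some ((16 * pvHexVal c1 + pvHexVal c2 : Nat) : Int) := by
  intro c1 h1 c2 h2
  fin_cases h1 <;> fin_cases h2 <;> decide

theorem pvLoopA_acc : ∀ (cs : List Char) (acc : List Char),
    nameFormatLoopA acc cs = acc ++ nameFormatLoopA [] cs
  | [], acc => by simp [nameFormatLoopA]
  | [c], acc => by simp [nameFormatLoopA]
  | c1 :: c2 :: rest, acc => by
    by_cases h : [c1, c2] = ['0', '0']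
    · simp [nameFormatLoopA, h]
    · cases hp : PySem.Int.ofCharsBase? [c1, c2] 16 with
      | none => simp [nameFormatLoopA, h, hp]
      | some v =>
        simp only [nameFormatLoopA, h, hp, not_false_iff, if_pos]
        rw [pvLoopA_acc rest (acc ++ [Char.ofNat v.toNat]),
            pvLoopA_acc rest ([] ++ [Char.ofNat v.toNat])]
        simp

theorem pvSliceShift (a : Nat) (xs : List Char) :
    PySem.Chars.slice xs (some ((a : Int))) (some ((a : Int) + 2)) = (xs.drop a).take 2 := by
  have h : ((a : Int) + 2) = ((a + 2 : Nat) : Int) := by push_cast; ring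
  rw [PySem.Chars.slice, h, PySem.List.slice_natCast]
  congr 1
  omega

theorem pvPairsB_cons (c1 c2 : Char) (rest : List Char) :
    pvPairsB (c1 :: c2 :: rest) = [c1, c2] :: pvPairsB rest := by
  unfold pvPairsB
  rw [PySem.List.pyRange_of_pos _ _ (by norm_num : (0:Int) < 2),
      PySem.List.pyRange_of_pos _ _ (by norm_num : (0:Int) < 2)]
  have hlen : ((c1 :: c2 :: rest).length : Int) - 1 = (rest.length : Int) + 1 := by
    push_cast [List.length_cons]; ring
  rw [hlen]
  have hif1 : (if (0:Int) < (rest.length : Int) + 1 then ((((rest.length : Int) + 1) - 0 + 2 - 1) / 2).toNat else 0) = rest.length / 2 + 1 := by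
    rw [if_pos (by positivity)]; omega
  have hif2 : (if (0:Int) < (rest.length : Int) - 1 then ((((rest.length : Int) - 1) - 0 + 2 - 1) / 2).toNat else 0) = rest.length / 2 := by
    split_ifs with h <;> omega
  rw [hif1, hif2, List.range_succ_eq_map]
  simp only [List.map_cons, List.map_map]
  refine congrArg₂ _ ?_ ?_
  · simp only [Nat.cast_zero, mul_zero, add_zero, zero_add]
    show PySem.List.slice (c1 :: c2 :: rest) (some ((0:Nat):Int)) (some ((2:Nat):Int)) = [c1, c2]
    rw [PySem.List.slice_natCast]
    rfl
  · apply List.map_congr_left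
    intro k _
    simp only [Function.comp]
    have e1 : (0 : Int) + 2 * ((Nat.succ k : Nat) : Int) = ((2 * k + 2 : Nat) : Int) := by push_cast; ring
    have e2 : (0 : Int) + 2 * ((k : Nat) : Int) = ((2 * k : Nat) : Int) := by push_cast; ring
    rw [e1, e2, pvSliceShift, pvSliceShift]
    have h2 : 2 * k + 2 = (2 * k) + 1 + 1 := by ring
    rw [h2, List.drop_succ_cons, List.drop_succ_cons]

-- the cutoff of a two-char step: first pair not "00" pushes the cutoff by 2
theorem pvCutB_cons (c1 c2 : Char) (rest : List Char) (h : ¬ ([c1, c2] = ['0', '0'])) :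
    pvCutB (c1 :: c2 :: rest) = pvCutB rest + 2 := by
  unfold pvCutB
  rw [pvPairsB_cons]
  rw [show PySem.List.index? ([c1, c2] :: pvPairsB rest) ['0','0']
        = (PySem.List.index? (pvPairsB rest) ['0','0']).map (· + 1) by
    simp only [PySem.List.index?, List.idxOf?_cons]
    rw [if_neg (by simpa using h)]]
  cases hk : PySem.List.index? (pvPairsB rest) ['0','0'] with
  | none => simp only [Option.map_none]; simp [List.length_cons]; omega
  | some k => simp only [Option.map_some]; ring

-- a hex digit is not whitespace, so the fromhex filter keeps it
theorem pvHexNotWs : ∀ c ∈ pvHexChars, pvIsAsciiWs c = false := by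
  intro c hc
  fin_cases hc <;> rfl

theorem pvMain : ∀ (cs : List Char), pvHexPrefixOk cs = true →
    pvFromHex? (cs.take (pvCutB cs)) = some (nameFormatLoopA [] cs)
  | [], _ => by rfl
  | [c], _ => by rfl
  | c1 :: c2 :: rest, h => by
    by_cases h00 : [c1, c2] = ['0', '0']
    · simp only [List.cons.injEq, and_true] at h00
      obtain ⟨e1, e2⟩ := h00
      subst e1; subst e2
      have hcut : pvCutB ('0' :: '0' :: rest) = 0 := by
        unfold pvCutB
        rw [pvPairsB_cons]
        simp [PySem.List.index?, List.idxOf?_cons]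
      rw [hcut]
      simp [pvFromHex?, pvFromHexPairs?, nameFormatLoopA]
    · have hne : ¬ (c1 = '0' && c2 = '0') = true := by
        simp only [Bool.and_eq_true, decide_eq_true_eq]
        rintro ⟨e1, e2⟩; exact h00 (by rw [e1, e2])
      rw [pvHexPrefixOk, if_neg hne] at h
      obtain ⟨⟨hc1, hc2⟩, hrest⟩ := by simpa [Bool.and_eq_true] using h
      have hm1 : c1 ∈ pvHexChars := by simpa using hc1
      have hm2 : c2 ∈ pvHexChars := by simpa using hc2
      rw [pvCutB_cons c1 c2 rest h00]
      rw [show pvCutB rest + 2 = (pvCutB rest + 1) + 1 from rfl,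
          List.take_succ_cons, List.take_succ_cons]
      rw [pvFromHex?, List.filter_cons_of_pos (by simp [pvHexNotWs c1 hm1]),
          List.filter_cons_of_pos (by simp [pvHexNotWs c2 hm2])]
      rw [pvFromHexPairs?, if_pos (by simp [hc1, hc2])]
      have ih := pvMain rest hrest
      rw [pvFromHex?] at ih
      rw [ih]
      rw [nameFormatLoopA, if_pos h00, pvPairParse c1 hm1 c2 hm2]
      simp only [Option.map_some, List.nil_append, Int.toNat_natCast]
      rw [pvLoopA_acc rest [Char.ofNat (16 * pvHexVal c1 + pvHexVal c2)]]
      simp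

-- ===== VERDICT (by name: the statement is the Claim_ definition above) =====
theorem nameFormat_spec : Claim_equal_nameFormat := by
  intro name _ hpre
  unfold Spec_nameFormat nameFormat nameFormat_alt
  by_cases h : name.toList = [] <;> simp [h]
  rw [pvMain name.toList hpre]
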